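-- pv_equiv track=rewrite | github.com/MedivhAran/JPFinder | app_ui.py | find_phrase_ranges
-- ===== SOURCE A (Python) =====
-- from typing import Optional, List, Tuple
--
-- def find_phrase_ranges(text: str, phrases: List[str]) -> List[Tuple[int, int]]:
--     ranges: List[Tuple[int, int]] = []
--     for p in phrases:
--         if not p:
--             continue
--         start = 0
--         while True:
--             i = text.find(p, start)
--             if i == -1:
--                 break
--             ranges.append((i, i + len(p)))
--             start = i + len(p)
--     ranges.sort()
--     merged: List[Tuple[int, int]] = []
--     for s, e in ranges:
--         if not merged or s > merged[-1][1]: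
--             merged.append((s, e))
--         else:
--             merged[-1] = (merged[-1][0], max(merged[-1][1], e))
--     return merged
-- ===== SOURCE B (Python) =====
-- from typing import List, Tuple
--
-- def find_phrase_ranges(text: str, phrases: List[str]) -> List[Tuple[int, int]]:
--     # Coverage-bitmap strategy: mark covered positions directly while scanning,
--     # then read the maximal covered runs off the bitmap (no range list, no sort, no merge).
--     n = len(text)
--     cov = bytearray(n)
--     for p in phrases:
--         lp = len(p)
--         if lp == 0:
--             continue
--         start = 0
--         while True:
--             i = text.find(p, start)
--             if i == -1:
--                 break
--             cov[i:i + lp] = b"\x01" * lp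
--             start = i + lp
--     out: List[Tuple[int, int]] = []
--     i = 0
--     while i < n:
--         if cov[i]:
--             j = i
--             while j < n and cov[j]:
--                 j += 1
--             out.append((i, j))
--             i = j
--         else:
--             i += 1
--     return out
-- ===== Notes on version B (the rewrite author's own statement) =====
-- stated objective: alternative
-- what changed: B replaces A's collect-all-ranges + sort + pairwise-merge pipeline with a coverage bitmap: matches mark covered positions directly and the answer is read off as the maximal covered runs, with no range list, no sorting and no merge loop.
import Mathlib
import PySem

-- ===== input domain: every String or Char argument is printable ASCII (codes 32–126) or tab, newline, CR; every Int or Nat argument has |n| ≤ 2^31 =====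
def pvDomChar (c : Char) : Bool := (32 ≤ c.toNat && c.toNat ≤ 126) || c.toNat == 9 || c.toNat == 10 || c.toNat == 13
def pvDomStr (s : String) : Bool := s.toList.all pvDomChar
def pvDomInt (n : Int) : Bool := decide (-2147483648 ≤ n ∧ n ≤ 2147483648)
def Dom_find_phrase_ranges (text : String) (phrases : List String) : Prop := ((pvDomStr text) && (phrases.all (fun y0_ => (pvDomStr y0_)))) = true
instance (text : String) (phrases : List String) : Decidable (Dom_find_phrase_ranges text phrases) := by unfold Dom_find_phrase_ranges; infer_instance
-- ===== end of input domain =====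

-- B replaces A's collect-all-ranges + sort + merge pipeline by a coverage bitmap read off
-- as maximal covered runs; same return value, no speed claim (objective: alternative).

-- ===== PORT A =====
-- Python's text.find(p, start) is PySem.Chars.findFrom; A's inner `while True` loop is
-- ported with fuel |text|+1, which is never exhausted before find returns -1 because each
-- found match advances start by len(p) ≥ 1 (p nonempty) and start never exceeds |text|.
def pyFindAll (t p : List Char) (start fuel : Nat) : List (Int × Int) :=
  match fuel with
  | 0 => []
  | fuel + 1 =>
    let i := PySem.Chars.findFrom t p (start : Int) none
    if i = -1 then []
    else (i, i + (p.length : Int)) :: pyFindAll t p (i.toNat + p.length) fuel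

-- one step of A's merge loop; `merged` is kept reversed (its head is Python's merged[-1])
def mergeStep (merged : List (Int × Int)) (se : Int × Int) : List (Int × Int) :=
  match merged with
  | [] => [se]
  | (ms, me) :: rest =>
    if se.1 > me then se :: (ms, me) :: rest else (ms, max me se.2) :: rest

def find_phrase_ranges (text : String) (phrases : List String) : List (Int × Int) :=
  let t := text.toList
  let ranges : List (Int × Int) :=
    phrases.foldl (fun acc p =>
      if p.toList = [] then acc                      -- Python: `if not p: continue`
      else acc ++ pyFindAll t p.toList 0 (t.length + 1)) []
  let sortedR := PySem.List.sorted2 ranges Prod.fst Prod.snd  -- ranges.sort() on int pairs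
  (sortedR.foldl mergeStep []).reverse

-- ===== PORT B =====
-- cov[i:i+l] = b"\x01" * l
def markRange (cov : List Bool) (i l : Nat) : List Bool :=
  match l with
  | 0 => cov
  | l + 1 => markRange (cov.set i true) (i + 1) l

-- B's per-phrase find loop: same str.find stepping as A's, but it marks the bitmap
-- instead of collecting ranges (same fuel discipline, exact for nonempty p)
def markAll (t p : List Char) (start fuel : Nat) (cov : List Bool) : List Bool :=
  match fuel with
  | 0 => cov
  | fuel + 1 =>
    let i := PySem.Chars.findFrom t p (start : Int) none
    if i = -1 then cov
    else markAll t p (i.toNat + p.length) fuel (markRange cov i.toNat p.length)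

-- inner `j = i; while j < n and cov[j]: j += 1` (fuel n - j is exact)
def runEnd (cov : List Bool) (n j fuel : Nat) : Nat :=
  match fuel with
  | 0 => j
  | fuel + 1 =>
    if j < n then
      if cov.getD j false then runEnd cov n (j + 1) fuel else j
    else j

-- outer scan `i = 0; while i < n: …` (fuel n+1 is exact: i advances by ≥ 1 per step)
def runs (cov : List Bool) (n i fuel : Nat) : List (Int × Int) :=
  match fuel with
  | 0 => []
  | fuel + 1 =>
    if i < n then
      if cov.getD i false then
        let j := runEnd cov n i (n - i)
        ((i : Int), (j : Int)) :: runs cov n j fuel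
      else runs cov n (i + 1) fuel
    else []

def find_phrase_ranges_alt (text : String) (phrases : List String) : List (Int × Int) :=
  let t := text.toList
  let n := t.length
  let cov := phrases.foldl (fun cov p =>
    if p.toList = [] then cov                        -- Python: `if lp == 0: continue`
    else markAll t p.toList 0 (n + 1) cov) (List.replicate n false)
  runs cov n 0 (n + 1)

-- ===== PRECONDITION & SPEC =====
def Spec_find_phrase_ranges (text : String) (phrases : List String) (out : List (Int × Int)) : Prop := out = find_phrase_ranges_alt text phrases
instance (text : String) (phrases : List String) (out : List (Int × Int)) : Decidable (Spec_find_phrase_ranges text phrases out) := by unfold Spec_find_phrase_ranges; infer_instance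

-- ===== CLAIM (what is proved, stated in full; the proofs are below) =====
def Claim_equal_find_phrase_ranges : Prop := ∀ (text : String) (phrases : List String), Dom_find_phrase_ranges text phrases → Spec_find_phrase_ranges text phrases (find_phrase_ranges text phrases)

-- ===== LEMMAS AND PROOFS =====

-- k is covered by one of the (half-open) integer ranges of L
def CoveredI (L : List (Int × Int)) (k : Int) : Prop := ∃ q ∈ L, q.1 ≤ k ∧ k < q.2

-- Boolean form of CoveredI (used to state what the bitmap holds)
def coveredB (L : List (Int × Int)) (k : Int) : Bool :=
  L.any (fun q => decide (q.1 ≤ k) && decide (k < q.2))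

theorem coveredB_iff (L : List (Int × Int)) (k : Int) :
    coveredB L k = true ↔ CoveredI L k := by
  simp [coveredB, CoveredI]

-- canonical merged form: nonempty ranges, strictly separated (a gap between consecutive ones)
def Canon : List (Int × Int) → Prop
  | [] => True
  | [q] => q.1 < q.2
  | q :: r :: rest => q.1 < q.2 ∧ q.2 < r.1 ∧ Canon (r :: rest)

-- A's merge loop, rewritten front-to-back with the current range as an accumulator
def mergeRec : Int × Int → List (Int × Int) → List (Int × Int)
  | c, [] => [c]
  | c, q :: t => if q.1 > c.2 then c :: mergeRec q t else mergeRec (c.1, max c.2 q.2) t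

theorem canon_tail {q : Int × Int} {t : List (Int × Int)} (h : Canon (q :: t)) : Canon t := by
  cases t with
  | nil => trivial
  | cons r rest => exact h.2.2

theorem canon_head_ne {q : Int × Int} {t : List (Int × Int)} (h : Canon (q :: t)) : q.1 < q.2 := by
  cases t with
  | nil => exact h
  | cons r rest => exact h.1

theorem canon_head_lt {q : Int × Int} {t : List (Int × Int)} (h : Canon (q :: t)) :
    ∀ r ∈ t, q.2 < r.1 := by
  induction t generalizing q with
  | nil => intro r hr; cases hr
  | cons r rest ih =>
    intro r' hr'
    rcases List.mem_cons.mp hr' with hr' | hr'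
    · subst hr'; exact h.2.1
    · have h1 := h.2.1
      have h2 := canon_head_ne h.2.2
      have h3 := ih h.2.2 r' hr'
      omega

theorem covered_unique {L1 L2 : List (Int × Int)} (h1 : Canon L1) (h2 : Canon L2)
    (hc : ∀ k, CoveredI L1 k ↔ CoveredI L2 k) : L1 = L2 := by
  induction L1 generalizing L2 with
  | nil =>
    cases L2 with
    | nil => rfl
    | cons q2 t2 =>
      exfalso
      have : CoveredI (q2 :: t2) q2.1 :=
        ⟨q2, List.mem_cons_self, le_refl _, canon_head_ne h2⟩
      rcases (hc q2.1).mpr this with ⟨q, hq, _⟩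
      cases hq
  | cons q1 t1 ih =>
    cases L2 with
    | nil =>
      exfalso
      have : CoveredI (q1 :: t1) q1.1 :=
        ⟨q1, List.mem_cons_self, le_refl _, canon_head_ne h1⟩
      rcases (hc q1.1).mp this with ⟨q, hq, _⟩
      cases hq
    | cons q2 t2 =>
      have hne1 := canon_head_ne h1
      have hne2 := canon_head_ne h2
      have hlt1 := canon_head_lt h1
      have hlt2 := canon_head_lt h2
      -- the least covered point is the head start, on both sides
      have hs21 : q2.1 ≤ q1.1 := by
        rcases (hc q1.1).mp ⟨q1, List.mem_cons_self, le_refl _, hne1⟩ with ⟨r, hr, hr1, hr2⟩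
        rcases List.mem_cons.mp hr with hr | hr
        · subst hr; exact hr1
        · have := hlt2 r hr; omega
      have hs12 : q1.1 ≤ q2.1 := by
        rcases (hc q2.1).mpr ⟨q2, List.mem_cons_self, le_refl _, hne2⟩ with ⟨r, hr, hr1, hr2⟩
        rcases List.mem_cons.mp hr with hr | hr
        · subst hr; exact hr1
        · have := hlt1 r hr; omega
      have hs : q1.1 = q2.1 := le_antisymm hs12 hs21
      -- the head end is the first uncovered point after the head start, on both sides
      have he12 : q1.2 ≤ q2.2 := by
        by_contra hlt
        push Not at hlt
        rcases (hc q2.2).mp ⟨q1, List.mem_cons_self, by omega, hlt⟩ with ⟨r, hr, hr1, hr2⟩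
        rcases List.mem_cons.mp hr with hr | hr
        · subst hr; omega
        · have := hlt2 r hr; omega
      have he21 : q2.2 ≤ q1.2 := by
        by_contra hlt
        push Not at hlt
        rcases (hc q1.2).mpr ⟨q2, List.mem_cons_self, by omega, hlt⟩ with ⟨r, hr, hr1, hr2⟩
        rcases List.mem_cons.mp hr with hr | hr
        · subst hr; omega
        · have := hlt1 r hr; omega
      have he : q1.2 = q2.2 := le_antisymm he12 he21
      have hq : q1 = q2 := Prod.ext hs he
      have htails : ∀ k, CoveredI t1 k ↔ CoveredI t2 k := by
        intro k
        constructor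
        · rintro ⟨r, hr, hr1, hr2⟩
          have hk : q1.2 < k := by have := hlt1 r hr; omega
          rcases (hc k).mp ⟨r, List.mem_cons_of_mem _ hr, hr1, hr2⟩ with ⟨r', hr', hr1', hr2'⟩
          rcases List.mem_cons.mp hr' with hr' | hr'
          · subst hr'; omega
          · exact ⟨r', hr', hr1', hr2'⟩
        · rintro ⟨r, hr, hr1, hr2⟩
          have hk : q2.2 < k := by have := hlt2 r hr; omega
          rcases (hc k).mpr ⟨r, List.mem_cons_of_mem _ hr, hr1, hr2⟩ with ⟨r', hr', hr1', hr2'⟩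
          rcases List.mem_cons.mp hr' with hr' | hr'
          · subst hr'; omega
          · exact ⟨r', hr', hr1', hr2'⟩
      rw [hq, ih (canon_tail h1) (canon_tail h2) htails]

theorem foldl_mergeStep_eq (L : List (Int × Int)) (c : Int × Int) (acc : List (Int × Int)) :
    L.foldl mergeStep (c :: acc) = (mergeRec c L).reverse ++ acc := by
  induction L generalizing c acc with
  | nil => simp [mergeRec]
  | cons q t ih =>
    obtain ⟨cs, ce⟩ := c
    simp only [List.foldl_cons, mergeStep, mergeRec]
    split
    · rw [ih]; simp
    · rw [ih]

theorem mergeRec_head (c : Int × Int) (L : List (Int × Int)) :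
    ∀ hd tl, mergeRec c L = hd :: tl → hd.1 = c.1 := by
  induction L generalizing c with
  | nil => intro hd tl h; simp only [mergeRec] at h; cases h; rfl
  | cons q t ih =>
    intro hd tl h
    simp only [mergeRec] at h
    split at h
    · cases h; rfl
    · exact ih (c.1, max c.2 q.2) _ _ h

theorem mergeRec_spec (L : List (Int × Int)) (c : Int × Int)
    (hc : c.1 < c.2) (hL : ∀ q ∈ L, q.1 < q.2)
    (hp : List.Pairwise (fun a b => a.1 ≤ b.1) (c :: L)) :
    Canon (mergeRec c L) ∧
      ∀ k, CoveredI (mergeRec c L) k ↔ (c.1 ≤ k ∧ k < c.2) ∨ CoveredI L k := by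
  induction L generalizing c with
  | nil =>
    refine ⟨hc, fun k => ?_⟩
    simp [mergeRec, CoveredI]
  | cons q t ih =>
    have hq := hL q (List.mem_cons_self)
    have hcq : c.1 ≤ q.1 := (List.pairwise_cons.mp hp).1 q (List.mem_cons_self)
    have hpt : List.Pairwise (fun a b => a.1 ≤ b.1) (q :: t) := (List.pairwise_cons.mp hp).2
    simp only [mergeRec]
    by_cases hgt : q.1 > c.2
    · rw [if_pos hgt]
      obtain ⟨ih1, ih2⟩ := ih q hq (fun r hr => hL r (List.mem_cons_of_mem _ hr)) hpt
      constructor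
      · rcases hm : mergeRec q t with _ | ⟨r, rest⟩
        · exact hc
        · have hr1 : r.1 = q.1 := mergeRec_head q t r rest hm
          exact ⟨hc, by omega, hm ▸ ih1⟩
      · intro k
        constructor
        · rintro ⟨r, hr, hk1, hk2⟩
          rcases List.mem_cons.mp hr with hr | hr
          · subst hr; exact Or.inl ⟨hk1, hk2⟩
          · rcases (ih2 k).mp ⟨r, hr, hk1, hk2⟩ with h | h
            · exact Or.inr ⟨q, List.mem_cons_self, h⟩
            · obtain ⟨r', hr', h'⟩ := h
              exact Or.inr ⟨r', List.mem_cons_of_mem _ hr', h'⟩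
        · rintro (h | ⟨r, hr, hk1, hk2⟩)
          · exact ⟨c, List.mem_cons_self, h⟩
          · rcases List.mem_cons.mp hr with hr | hr
            · subst hr
              obtain ⟨r', hr', h'⟩ := (ih2 k).mpr (Or.inl ⟨hk1, hk2⟩)
              exact ⟨r', List.mem_cons_of_mem _ hr', h'⟩
            · obtain ⟨r', hr', h'⟩ := (ih2 k).mpr (Or.inr ⟨r, hr, hk1, hk2⟩)
              exact ⟨r', List.mem_cons_of_mem _ hr', h'⟩
    · rw [if_neg hgt]
      have hc' : (c.1, max c.2 q.2).1 < (c.1, max c.2 q.2).2 := by simp only; omega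
      have hp' : List.Pairwise (fun a b => a.1 ≤ b.1) ((c.1, max c.2 q.2) :: t) := by
        refine List.pairwise_cons.mpr ⟨fun r hr => ?_, (List.pairwise_cons.mp hpt).2⟩
        exact le_trans hcq ((List.pairwise_cons.mp hpt).1 r hr)
      obtain ⟨ih1, ih2⟩ := ih (c.1, max c.2 q.2) hc'
        (fun r hr => hL r (List.mem_cons_of_mem _ hr)) hp'
      refine ⟨ih1, fun k => ?_⟩
      rw [ih2 k]
      constructor
      · rintro (h | h)
        · simp only at h
          by_cases hk : k < c.2
          · exact Or.inl ⟨h.1, hk⟩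
          · exact Or.inr ⟨q, List.mem_cons_self, by omega, by omega⟩
        · obtain ⟨r, hr, h'⟩ := h
          exact Or.inr ⟨r, List.mem_cons_of_mem _ hr, h'⟩
      · rintro (h | ⟨r, hr, hk1, hk2⟩)
        · exact Or.inl ⟨h.1, by simp only; omega⟩
        · rcases List.mem_cons.mp hr with hr | hr
          · subst hr; exact Or.inl ⟨by simp only; omega, by simp only; omega⟩
          · exact Or.inr ⟨r, hr, hk1, hk2⟩

theorem sorted2_pairwise_fst (L : List (Int × Int)) :
    List.Pairwise (fun a b => a.1 ≤ b.1) (PySem.List.sorted2 L Prod.fst Prod.snd) := by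
  have hfun : (fun (a b : Int × Int) => decide (a.1 < b.1) || !decide (b.1 < a.1) && decide (a.2 < b.2))
      = (fun a b => decide ((toLex a : Int ×ₗ Int) < toLex b)) := by
    funext a b
    rcases lt_trichotomy a.1 b.1 with h | h | h
    · simp [Prod.Lex.lt_iff, ofLex_toLex, h]
    · simp [Prod.Lex.lt_iff, ofLex_toLex, h]
    · simp only [Prod.Lex.lt_iff, ofLex_toLex]
      rw [decide_eq_false (by omega : ¬ a.1 < b.1), decide_eq_true h]
      simp only [Bool.false_or, Bool.not_true, Bool.false_and]
      symm
      rw [decide_eq_false (by push Not; exact ⟨by omega, fun _ => by omega⟩)]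
  have heq : PySem.List.sorted2 L Prod.fst Prod.snd
      = L.foldl (fun acc x => PySem.List.insertBy (fun a b => decide ((toLex a : Int ×ₗ Int) < toLex b)) x acc) [] := by
    show L.foldl (fun acc x => PySem.List.insertBy _ x acc) [] = _
    rw [hfun]
    rfl
  rw [heq]
  have : ∀ (xs : List (Int × Int)) (acc : List (Int × Int)),
      List.Pairwise (fun a b => (toLex a : Int ×ₗ Int) ≤ toLex b) acc →
      List.Pairwise (fun a b => (toLex a : Int ×ₗ Int) ≤ toLex b)
        (xs.foldl (fun acc x => PySem.List.insertBy (fun a b => decide ((toLex a : Int ×ₗ Int) < toLex b)) x acc) acc) := by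
    intro xs
    induction xs with
    | nil => intro acc h; exact h
    | cons x xs ih =>
      intro acc h
      exact ih _ (PySem.List.insertBy_pairwise_le (fun q => (toLex q : Int ×ₗ Int)) x acc h)
  have hh := this L [] List.Pairwise.nil
  refine hh.imp ?_
  intro a b hab
  rw [Prod.Lex.le_iff] at hab
  simp only [ofLex_toLex] at hab
  rcases hab with h | h
  · exact le_of_lt h
  · exact le_of_eq h.1

-- occurrences found by A's loop lie in [start, n) and have length |p|
-- the index i returned by a successful text.find(p, start) : start ≤ i and i + |p| ≤ |t|
theorem findFrom_found (t p : List Char) (hp : p ≠ []) (start : Nat) (hs : start ≤ t.length)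
    (h : PySem.Chars.findFrom t p (start : Int) none ≠ -1) :
    (start : Int) ≤ PySem.Chars.findFrom t p (start : Int) none ∧
    (PySem.Chars.findFrom t p (start : Int) none).toNat + p.length ≤ t.length := by
  obtain ⟨h1, h2, _⟩ := PySem.Chars.findFrom_natCast_spec t p start hs h
  refine ⟨h1, ?_⟩
  have h3 := h2.length_le
  rw [List.length_drop] at h3
  have h0 : (0:Int) ≤ (start : Int) := Int.natCast_nonneg start
  have h4 : 0 < p.length := List.length_pos_iff.mpr hp
  omega

theorem pyFindAll_bounds (t p : List Char) (hp : p ≠ []) :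
    ∀ fuel start, start ≤ t.length →
      ∀ q ∈ pyFindAll t p start fuel,
        (start : Int) ≤ q.1 ∧ q.2 = q.1 + (p.length : Int) ∧ q.2 ≤ (t.length : Int) := by
  intro fuel
  induction fuel with
  | zero => intro start hs q hq; cases hq
  | succ fuel ih =>
    intro start hs q hq
    simp only [pyFindAll] at hq
    by_cases h : PySem.Chars.findFrom t p (start : Int) none = -1
    · rw [if_pos h] at hq; cases hq
    · rw [if_neg h] at hq
      obtain ⟨f1, f2⟩ := findFrom_found t p hp start hs h
      set i := PySem.Chars.findFrom t p (start : Int) none with hi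
      have hnn : (0:Int) ≤ i := by omega
      have hit : i = ((i.toNat : Nat) : Int) := by omega
      rcases List.mem_cons.mp hq with hq | hq
      · subst hq
        refine ⟨f1, rfl, ?_⟩
        simp only
        omega
      · have := ih (i.toNat + p.length) (by omega) q hq
        refine ⟨by push_cast at this ⊢; omega, this.2.1, this.2.2⟩

theorem markRange_length (cov : List Bool) (i l : Nat) :
    (markRange cov i l).length = cov.length := by
  induction l generalizing cov i with
  | zero => rfl
  | succ l ih => simp [markRange, ih]

theorem markRange_getD (cov : List Bool) (i l : Nat) (h : i + l ≤ cov.length) (k : Nat) :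
    (markRange cov i l).getD k false = (cov.getD k false || decide (i ≤ k ∧ k < i + l)) := by
  induction l generalizing cov i with
  | zero => simp [markRange]
  | succ l ih =>
    simp only [markRange]
    rw [ih (cov.set i true) (i+1) (by simpa using (by omega : i + 1 + l ≤ cov.length))]
    have hset : (cov.set i true).getD k false = (cov.getD k false || decide (k = i)) := by
      by_cases hk : k = i
      · subst hk
        simp [List.getD, List.getElem?_set_self (by omega : k < cov.length)]
      · simp [List.getD, List.getElem?_set_ne (by omega : i ≠ k), hk]
    rw [hset]
    by_cases h1 : k = i
    · subst h1; simp
    · have h1d : (decide (k = i)) = false := decide_eq_false h1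
      by_cases h2 : i + 1 ≤ k ∧ k < i + 1 + l
      · rw [h1d, decide_eq_true h2, decide_eq_true (by omega : i ≤ k ∧ k < i + (l+1))]; simp
      · have h3 : ¬ (i ≤ k ∧ k < i + (l+1)) := by omega
        rw [h1d, decide_eq_false h2, decide_eq_false h3]; simp

theorem markAll_length (t p : List Char) (fuel start : Nat) (cov : List Bool) :
    (markAll t p start fuel cov).length = cov.length := by
  induction fuel generalizing start cov with
  | zero => rfl
  | succ fuel ih =>
    simp only [markAll]
    split
    · rfl
    · rw [ih, markRange_length]

-- B's marking loop marks exactly the positions covered by A's occurrence list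
theorem markAll_getD (t p : List Char) (hp : p ≠ []) :
    ∀ fuel start cov, start ≤ t.length → cov.length = t.length →
      ∀ k : Nat, (markAll t p start fuel cov).getD k false =
        (cov.getD k false || coveredB (pyFindAll t p start fuel) (k : Int)) := by
  intro fuel
  induction fuel with
  | zero => intro start cov hs hc k; simp [markAll, pyFindAll, coveredB]
  | succ fuel ih =>
    intro start cov hs hc k
    simp only [markAll, pyFindAll]
    by_cases h : PySem.Chars.findFrom t p (start : Int) none = -1
    · rw [if_pos h, if_pos h]; simp [coveredB]
    · rw [if_neg h, if_neg h]
      obtain ⟨f1, f2⟩ := findFrom_found t p hp start hs h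
      set i := PySem.Chars.findFrom t p (start : Int) none with hi
      have hnn : (0:Int) ≤ i := by omega
      rw [ih (i.toNat + p.length) _ (by omega) (by rw [markRange_length]; exact hc) k]
      rw [markRange_getD cov i.toNat p.length (by omega) k]
      have hd : decide (i.toNat ≤ k ∧ k < i.toNat + p.length) =
          (decide (i ≤ (k : Int)) && decide ((k : Int) < i + (p.length : Int))) := by
        by_cases hcase : i.toNat ≤ k ∧ k < i.toNat + p.length
        · rw [decide_eq_true hcase, decide_eq_true (by omega : i ≤ (k:Int)),
              decide_eq_true (by omega : (k:Int) < i + (p.length : Int))]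
          rfl
        · rw [decide_eq_false hcase]
          rcases not_and_or.mp hcase with hcase | hcase
          · rw [decide_eq_false (by omega : ¬ i ≤ (k:Int))]; rfl
          · rw [decide_eq_false (by omega : ¬ (k:Int) < i + (p.length : Int)), Bool.and_false]
      rw [hd]
      simp only [coveredB, List.any_cons]
      rw [Bool.or_assoc]

theorem runEnd_spec (cov : List Bool) (n : Nat) :
    ∀ fuel j, j ≤ n → n ≤ j + fuel →
      j ≤ runEnd cov n j fuel ∧ runEnd cov n j fuel ≤ n ∧
      (∀ k, j ≤ k → k < runEnd cov n j fuel → cov.getD k false = true) ∧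
      (runEnd cov n j fuel < n → cov.getD (runEnd cov n j fuel) false = false) := by
  intro fuel
  induction fuel with
  | zero =>
    intro j hjle hj
    simp only [runEnd]
    exact ⟨le_refl j, by omega, fun k h1 h2 => by omega, fun h => by omega⟩
  | succ fuel ih =>
    intro j hjle hj
    simp only [runEnd]
    by_cases hjn : j < n
    · simp only [if_pos hjn]
      by_cases hcj : cov.getD j false = true
      · simp only [if_pos hcj]
        obtain ⟨a1, a2, a3, a4⟩ := ih (j+1) (by omega) (by omega)
        refine ⟨by omega, a2, fun k h1 h2 => ?_, a4⟩
        rcases Nat.eq_or_lt_of_le h1 with h1 | h1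
        · exact h1 ▸ hcj
        · exact a3 k (by omega) h2
      · simp only [if_neg hcj]
        exact ⟨le_refl j, by omega, fun k h1 h2 => by omega,
          fun _ => by simpa using hcj⟩
    · simp only [if_neg hjn]
      exact ⟨le_refl j, by omega, fun k h1 h2 => by omega, fun h => by omega⟩

theorem runs_ge (cov : List Bool) (n : Nat) :
    ∀ fuel i, ∀ q ∈ runs cov n i fuel, (i : Int) ≤ q.1 := by
  intro fuel
  induction fuel with
  | zero => intro i q hq; cases hq
  | succ fuel ih =>
    intro i q hq
    simp only [runs] at hq
    by_cases hin : i < n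
    · rw [if_pos hin] at hq
      by_cases hci : cov.getD i false = true
      · rw [if_pos hci] at hq
        rcases List.mem_cons.mp hq with hq | hq
        · simp [hq]
        · have h1 := (runEnd_spec cov n (n - i) i (by omega) (by omega)).1
          have := ih _ q hq
          omega
      · rw [if_neg hci] at hq
        have := ih _ q hq
        omega
    · rw [if_neg hin] at hq; cases hq

theorem runs_spec (cov : List Bool) (n : Nat) :
    ∀ fuel i, i ≤ n → n + 1 ≤ i + fuel →
      Canon (runs cov n i fuel) ∧
      ∀ k : Int, CoveredI (runs cov n i fuel) k ↔
        ∃ m : Nat, k = (m : Int) ∧ i ≤ m ∧ m < n ∧ cov.getD m false = true := by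
  intro fuel
  induction fuel with
  | zero => intro i h1 h2; omega
  | succ fuel ih =>
    intro i hin hfuel
    simp only [runs]
    by_cases h1 : i < n
    · rw [if_pos h1]
      by_cases h2 : cov.getD i false = true
      · rw [if_pos h2]
        obtain ⟨e1, e2, e3, e4⟩ := runEnd_spec cov n (n - i) i (by omega) (by omega)
        set j := runEnd cov n i (n - i) with hj
        have hji : i < j := by
          rcases Nat.eq_or_lt_of_le e1 with h | h
          · exfalso
            rcases Nat.eq_or_lt_of_le e2 with h' | h'
            · omega
            · have := e4 (by omega)
              rw [← h] at this
              rw [this] at h2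
              exact absurd h2 (by simp)
          · exact h
        obtain ⟨c1, c2⟩ := ih j (by omega) (by omega)
        constructor
        · -- Canon ((i,j) :: runs cov n j fuel)
          rcases hrt : runs cov n j fuel with _ | ⟨r, rest⟩
          · show (i:Int) < (j:Int); exact_mod_cast hji
          · refine ⟨by show (i:Int) < (j:Int); exact_mod_cast hji, ?_, hrt ▸ c1⟩
            -- r.1 > j : runs from j has cov j false (or j = n, then runs = [])
            have hr : (j : Int) ≤ r.1 := by
              have := runs_ge cov n fuel j r (by rw [hrt]; exact List.mem_cons_self)
              exact this
            rcases Nat.eq_or_lt_of_le e2 with hjn | hjn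
            · exfalso
              have : runs cov n j fuel = [] := by
                cases fuel with
                | zero => rfl
                | succ f => simp [runs, hjn]
              rw [this] at hrt; cases hrt
            · -- cov j = false; head r of runs-from-j is covered at r.1, so r.1 ≠ j
              have hcj := e4 hjn
              have hrc : CoveredI (runs cov n j fuel) r.1 := by
                refine ⟨r, by rw [hrt]; exact List.mem_cons_self, le_refl _, ?_⟩
                have hcr := (hrt ▸ c1 : Canon (r :: rest))
                exact canon_head_ne hcr
              rcases (c2 r.1).mp hrc with ⟨m, hm1, hm2, hm3, hm4⟩
              have : m ≠ j := fun h => by rw [h] at hm4; rw [hm4] at hcj; cases hcj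
              omega
        · intro k
          constructor
          · rintro ⟨q, hq, hq1, hq2⟩
            rcases List.mem_cons.mp hq with hq | hq
            · subst hq
              simp only at hq1 hq2
              refine ⟨k.toNat, by omega, by omega, by omega, ?_⟩
              exact e3 k.toNat (by omega) (by omega)
            · rcases (c2 k).mp ⟨q, hq, hq1, hq2⟩ with ⟨m, hm⟩
              exact ⟨m, hm.1, by omega, hm.2.2⟩
          · rintro ⟨m, hk, him, hmn, hcm⟩
            by_cases hmj : m < j
            · exact ⟨((i:Int), (j:Int)), List.mem_cons_self, by omega, by omega⟩
            · obtain ⟨q, hqmem, hq1, hq2⟩ := (c2 k).mpr ⟨m, hk, by omega, hmn, hcm⟩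
              exact ⟨q, List.mem_cons_of_mem _ hqmem, hq1, hq2⟩
      · rw [if_neg h2]
        obtain ⟨c1, c2⟩ := ih (i+1) (by omega) (by omega)
        refine ⟨c1, fun k => ?_⟩
        rw [c2 k]
        constructor
        · rintro ⟨m, hm⟩; exact ⟨m, hm.1, by omega, hm.2.2⟩
        · rintro ⟨m, hk, him, hmn, hcm⟩
          refine ⟨m, hk, ?_, hmn, hcm⟩
          rcases Nat.eq_or_lt_of_le him with h | h
          · exfalso; rw [← h] at hcm; rw [hcm] at h2; exact h2 rfl
          · omega
    · rw [if_neg h1]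
      refine ⟨trivial, fun k => ?_⟩
      simp [CoveredI]
      intro m h hm; omega

-- the fold over phrases appends on the right: peel the accumulator off
theorem ranges_fold_acc (t : List Char) (phrases : List String) (acc : List (Int × Int)) :
    phrases.foldl (fun acc p =>
        if p.toList = [] then acc
        else acc ++ pyFindAll t p.toList 0 (t.length + 1)) acc =
      acc ++ phrases.foldl (fun acc p =>
        if p.toList = [] then acc
        else acc ++ pyFindAll t p.toList 0 (t.length + 1)) [] := by
  induction phrases generalizing acc with
  | nil => simp
  | cons p ps ih =>
    simp only [List.foldl_cons]
    by_cases h : p.toList = []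
    · rw [if_pos h, if_pos h]; exact ih acc
    · rw [if_neg h, if_neg h, List.nil_append,
        ih (acc ++ pyFindAll t p.toList 0 (t.length + 1)),
        ih (pyFindAll t p.toList 0 (t.length + 1)), List.append_assoc]

-- membership-wise bounds of A's collected ranges
theorem ranges_bounds (t : List Char) (phrases : List String) :
    ∀ q ∈ phrases.foldl (fun acc p =>
        if p.toList = [] then acc
        else acc ++ pyFindAll t p.toList 0 (t.length + 1)) ([] : List (Int × Int)),
      0 ≤ q.1 ∧ q.1 < q.2 ∧ q.2 ≤ (t.length : Int) := by
  induction phrases with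
  | nil => intro q hq; cases hq
  | cons p ps ih =>
    intro q hq
    simp only [List.foldl_cons] at hq
    by_cases h : p.toList = []
    · rw [if_pos h] at hq; exact ih q hq
    · rw [if_neg h, ranges_fold_acc, List.nil_append] at hq
      rcases List.mem_append.mp hq with hq | hq
      · obtain ⟨b1, b2, b3⟩ := pyFindAll_bounds t p.toList h (t.length + 1) 0 (by omega) q hq
        have hlen : 0 < p.toList.length := List.length_pos_iff.mpr h
        refine ⟨b1, by omega, b3⟩
      · exact ih q hq

-- B's final bitmap is the coverage indicator of A's collected ranges
theorem cov_fold_getD (t : List Char) (phrases : List String) :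
    ∀ cov : List Bool, cov.length = t.length →
      ∀ k : Nat,
        (phrases.foldl (fun cov p =>
            if p.toList = [] then cov
            else markAll t p.toList 0 (t.length + 1) cov) cov).getD k false =
        (cov.getD k false ||
          coveredB (phrases.foldl (fun acc p =>
            if p.toList = [] then acc
            else acc ++ pyFindAll t p.toList 0 (t.length + 1)) []) (k : Int)) := by
  induction phrases with
  | nil => intro cov hc k; simp [coveredB]
  | cons p ps ih =>
    intro cov hc k
    simp only [List.foldl_cons]
    by_cases h : p.toList = []
    · rw [if_pos h, if_pos h, ih cov hc k]
    · rw [if_neg h, if_neg h, ranges_fold_acc, List.nil_append,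
        ih (markAll t p.toList 0 (t.length + 1) cov) (by rw [markAll_length]; exact hc) k,
        markAll_getD t p.toList h (t.length + 1) 0 cov (by omega) hc k]
      have hsplit : ∀ (L1 L2 : List (Int × Int)) (x : Int),
          coveredB (L1 ++ L2) x = (coveredB L1 x || coveredB L2 x) := by
        intro L1 L2 x; simp [coveredB]
      rw [hsplit, Bool.or_assoc]

theorem cov_fold_length (t : List Char) (phrases : List String) (cov : List Bool) :
    (phrases.foldl (fun cov p =>
        if p.toList = [] then cov
        else markAll t p.toList 0 (t.length + 1) cov) cov).length = cov.length := by
  induction phrases generalizing cov with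
  | nil => rfl
  | cons p ps ih =>
    simp only [List.foldl_cons]
    split
    · exact ih cov
    · rw [ih, markAll_length]

-- CoveredI over a cons
theorem covered_cons (q : Int × Int) (L : List (Int × Int)) (k : Int) :
    CoveredI (q :: L) k ↔ (q.1 ≤ k ∧ k < q.2) ∨ CoveredI L k := by
  simp [CoveredI]

-- ===== VERDICT (by name: the statement is the Claim_ definition above) =====
theorem find_phrase_ranges_spec : Claim_equal_find_phrase_ranges := by
  intro text phrases _dom
  show find_phrase_ranges text phrases = find_phrase_ranges_alt text phrases
  simp only [find_phrase_ranges, find_phrase_ranges_alt]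
  set t := text.toList with ht
  set n := t.length with hn
  set R := phrases.foldl (fun acc p =>
      if p.toList = [] then acc
      else acc ++ pyFindAll t p.toList 0 (n + 1)) ([] : List (Int × Int)) with hR
  set sortedR := PySem.List.sorted2 R Prod.fst Prod.snd with hsorted
  set cov := phrases.foldl (fun cov p =>
      if p.toList = [] then cov
      else markAll t p.toList 0 (n + 1) cov) (List.replicate n false) with hcov
  -- facts about the collected ranges
  have hbounds := ranges_bounds t phrases
  have hmemR : ∀ q, q ∈ sortedR ↔ q ∈ R := fun q =>
    (PySem.List.sorted2_perm R Prod.fst Prod.snd false).mem_iff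
  have hcovsort : ∀ k, CoveredI sortedR k ↔ CoveredI R k := by
    intro k
    constructor
    · rintro ⟨q, hq, h⟩; exact ⟨q, (hmemR q).mp hq, h⟩
    · rintro ⟨q, hq, h⟩; exact ⟨q, (hmemR q).mpr hq, h⟩
  -- A's side: the merged list is canonical and covers what the ranges cover
  have hA : Canon ((sortedR.foldl mergeStep []).reverse) ∧
      ∀ k, CoveredI ((sortedR.foldl mergeStep []).reverse) k ↔ CoveredI R k := by
    rcases hsr : sortedR with _ | ⟨c, rest⟩
    · constructor
      · exact trivial
      · intro k
        rw [← hcovsort k, hsr]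
        simp [CoveredI]
    · have hcR : c ∈ R := (hmemR c).mp (hsr ▸ List.mem_cons_self)
      have hrestR : ∀ q ∈ rest, q ∈ R := fun q hq =>
        (hmemR q).mp (hsr ▸ List.mem_cons_of_mem _ hq)
      have hpw := sorted2_pairwise_fst R
      rw [← hsorted, hsr] at hpw
      obtain ⟨m1, m2⟩ := mergeRec_spec rest c (hbounds c hcR).2.1
        (fun q hq => (hbounds q (hrestR q hq)).2.1) hpw
      have hfold : ((c :: rest).foldl mergeStep []).reverse = mergeRec c rest := by
        show ((rest.foldl mergeStep (mergeStep [] c))).reverse = _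
        simp only [mergeStep]
        rw [foldl_mergeStep_eq rest c []]
        simp
      rw [hfold]
      refine ⟨m1, fun k => ?_⟩
      rw [m2 k, ← hcovsort k, hsr, covered_cons]
  -- B's side: the bitmap holds exactly the covered positions
  have hclen : cov.length = n := by
    rw [hcov, cov_fold_length]; simp
  have hcget : ∀ m : Nat, cov.getD m false = coveredB R (m : Int) := by
    intro m
    rw [hcov, cov_fold_getD t phrases (List.replicate n false) (by simpa using hn) m]
    have : (List.replicate n false).getD m false = false := by
      rcases Nat.lt_or_ge m n with h | h
      · simp [List.getD, h]
      · simp [List.getD]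
    rw [this, Bool.false_or]
  obtain ⟨hBcanon, hBcov⟩ := runs_spec cov n (n + 1) 0 (by omega) (by omega)
  -- both are canonical with the same covered set
  refine covered_unique hA.1 hBcanon ?_
  intro k
  rw [hA.2 k, hBcov k]
  constructor
  · rintro ⟨q, hq, hk1, hk2⟩
    obtain ⟨b1, b2, b3⟩ := hbounds q hq
    refine ⟨k.toNat, by omega, by omega, by omega, ?_⟩
    rw [hcget k.toNat, coveredB_iff]
    exact ⟨q, hq, by omega, by omega⟩
  · rintro ⟨m, hk, _, hmn, hcm⟩
    rw [hcget m, coveredB_iff] at hcm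
    subst hk
    exact hcm
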